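-- pv_equiv track=rewrite | github.com/thiagorb/FacebookHackerCup | 2015/Round 1/Autocomplete/autocomplete.py | solve
-- ===== SOURCE A (Python) =====
-- def solve(words):
--     d = {}
--     total = 0
--     for w in words:
--         dn = d
--         min_chars = None
--         chars = 0
--         for c in w:
--             if not c in dn:
--                 dn[c] = {}
--             dn = dn[c]
--
--             chars += 1
--             if len(dn) == 0 and min_chars == None:
--                 min_chars = chars
--         dn[0] = {}
--         total += min_chars if min_chars != None else len(w)
--     return total
-- ===== SOURCE B (Python) =====
-- def solve(words):
--     seen = []
--     total = 0
--     for w in words: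
--         best = 0
--         for u in seen:
--             k = 0
--             while k < len(w) and k < len(u) and w[k] == u[k]:
--                 k += 1
--             if k > best:
--                 best = k
--         total += min(best + 1, len(w))
--         seen.append(w)
--     return total
-- ===== Notes on version B (the rewrite author's own statement) =====
-- stated objective: simpler
-- what changed: Replaces A's mutable nested-dict trie (built incrementally, walking/creating nodes per character) with a plain list of previously seen words and a direct longest-common-prefix scan: each word contributes min(best_lcp+1, len(w)).
import Mathlib
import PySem

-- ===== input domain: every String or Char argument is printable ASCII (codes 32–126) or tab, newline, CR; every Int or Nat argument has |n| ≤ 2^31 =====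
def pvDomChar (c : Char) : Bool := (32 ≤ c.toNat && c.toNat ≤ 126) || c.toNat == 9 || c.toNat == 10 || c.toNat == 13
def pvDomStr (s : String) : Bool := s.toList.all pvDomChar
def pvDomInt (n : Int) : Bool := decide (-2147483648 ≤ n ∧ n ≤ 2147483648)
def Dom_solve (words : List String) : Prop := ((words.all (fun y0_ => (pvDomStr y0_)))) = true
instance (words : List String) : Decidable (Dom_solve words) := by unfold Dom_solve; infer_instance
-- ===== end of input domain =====

-- B replaces A's mutable nested-dict trie by a plain list of earlier words with a direct
-- longest-common-prefix scan per word (simpler; no trie structure at all).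

-- ===== PORT A =====
-- A's trie is a Python dict whose keys are characters plus the end-marker key 0;
-- modelled by TKey, and dict-of-dict nesting by the mutual pair Trie/TrieList
-- (an association list in insertion order, exactly a Python dict's semantics here).
inductive TKey where
  | mark : TKey
  | ch : Char → TKey
deriving DecidableEq

mutual
inductive Trie where
  | node : TrieList → Trie
inductive TrieList where
  | nil : TrieList
  | cons : TKey → Trie → TrieList → TrieList
end

-- dict lookup: first (unique) match
def TrieList.get? : TrieList → TKey → Option Trie
  | .nil, _ => none
  | .cons k0 v0 tl, k => if k0 = k then some v0 else TrieList.get? tl k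

-- dict assignment: overwrite in place, else append at the end
def TrieList.set : TrieList → TKey → Trie → TrieList
  | .nil, k, v => .cons k v .nil
  | .cons k0 v0 tl, k, v => if k0 = k then .cons k0 v tl else .cons k0 v0 (TrieList.set tl k v)

def TrieList.len : TrieList → Nat
  | .nil => 0
  | .cons _ _ tl => TrieList.len tl + 1

-- len(dn)
def Trie.clen : Trie → Nat
  | .node cl => cl.len

-- A's inner loop: walk/extend the trie along w (path-copying the in-place mutation),
-- tracking chars and min_chars exactly as the Python does; at the end dn[0] = {}.
def insertWord : Trie → List Char → Int → Option Int → Trie × Option Int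
  | .node cl, [], _chars, minc =>
      (Trie.node (cl.set TKey.mark (Trie.node TrieList.nil)), minc)
  | .node cl, c :: rest, chars, minc =>
      let cl' := if (cl.get? (TKey.ch c)).isSome then cl
                 else cl.set (TKey.ch c) (Trie.node TrieList.nil)
      let dn := (cl'.get? (TKey.ch c)).getD (Trie.node TrieList.nil)
      let chars' := chars + 1
      let minc' := if dn.clen = 0 ∧ minc = none then some chars' else minc
      let r := insertWord dn rest chars' minc'
      (Trie.node (cl'.set (TKey.ch c) r.1), r.2)

def solve (words : List String) : Int :=
  (words.foldl
    (fun (st : Trie × Int) w =>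
      let r := insertWord st.1 w.toList 0 none
      (r.1, st.2 + (match r.2 with
                    | some m => m
                    | none => (w.toList.length : Int))))
    (Trie.node TrieList.nil, 0)).2

-- ===== PORT B =====
-- the while loop comparing w[k] and u[k]: the obvious structural recursion over the same comparisons
def bLcp : List Char → List Char → Int
  | a :: as, b :: bs => if a = b then 1 + bLcp as bs else 0
  | _, _ => 0

def solve_alt (words : List String) : Int :=
  (words.foldl
    (fun (st : List String × Int) w =>
      let best := st.1.foldl
        (fun best u => let k := bLcp w.toList u.toList; if k > best then k else best) 0
      (st.1 ++ [w], st.2 + min (best + 1) (w.toList.length : Int)))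
    ([], 0)).2

-- ===== PRECONDITION & SPEC =====
def Spec_solve (words : List String) (out : Int) : Prop := out = solve_alt words
instance (words : List String) (out : Int) : Decidable (Spec_solve words out) := by unfold Spec_solve; infer_instance

-- ===== CLAIM (what is proved, stated in full; the proofs are below) =====
def Claim_equal_solve : Prop := ∀ (words : List String), Dom_solve words → Spec_solve words (solve words)

-- ===== LEMMAS AND PROOFS =====

-- length of the longest path of t that follows w (spec of the trie walk)
def lcpT : Trie → List Char → Nat
  | _, [] => 0
  | .node cl, c :: rest =>
      match cl.get? (TKey.ch c) with
      | some t' => 1 + lcpT t' rest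
      | none => 0

-- Nat version of bLcp (spec)
def natLcp : List Char → List Char → Nat
  | a :: as, b :: bs => if a = b then 1 + natLcp as bs else 0
  | _, _ => 0

-- spec of B's inner fold
def specLcp (seen : List String) (v : List Char) : Nat :=
  seen.foldl (fun m u => max m (natLcp v u.toList)) 0

def Trie.sub? : Trie → List Char → Option Trie
  | t, [] => some t
  | .node cl, c :: rest =>
      match cl.get? (TKey.ch c) with
      | some t' => Trie.sub? t' rest
      | none => none

-- every node reachable by a nonempty path has a nonempty dict
def NEsub (t : Trie) : Prop :=
  ∀ p t', p ≠ [] → t.sub? p = some t' → t'.clen ≠ 0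

theorem get?_set_self : (cl : TrieList) → (k : TKey) → (v : Trie) →
    (cl.set k v).get? k = some v
  | .nil, k, v => by simp [TrieList.set, TrieList.get?]
  | .cons k0 v0 tl, k, v => by
      by_cases h : k0 = k <;> simp [TrieList.set, TrieList.get?, h, get?_set_self tl k v]

theorem get?_set_ne : (cl : TrieList) → (k k' : TKey) → (v : Trie) → k ≠ k' →
    (cl.set k v).get? k' = cl.get? k'
  | .nil, k, k', v, h => by simp [TrieList.set, TrieList.get?, h]
  | .cons k0 v0 tl, k, k', v, h => by
      by_cases h0 : k0 = k
      · subst h0; simp [TrieList.set, TrieList.get?, h]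
      · simp [TrieList.set, TrieList.get?, h0, get?_set_ne tl k k' v h]

theorem set_len_pos (cl : TrieList) (k : TKey) (v : Trie) :
    (cl.set k v).len ≠ 0 := by
  cases cl with
  | nil => simp [TrieList.set, TrieList.len]
  | cons k0 v0 tl =>
      by_cases h : k0 = k <;> simp [TrieList.set, h, TrieList.len]

theorem insert_fst_clen (t : Trie) (w : List Char) (chars : Int) (minc : Option Int) :
    (insertWord t w chars minc).1.clen ≠ 0 := by
  cases t with
  | node cl =>
    cases w with
    | nil => simpa [insertWord, Trie.clen] using set_len_pos cl TKey.mark (Trie.node TrieList.nil)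
    | cons c rest => simpa [insertWord, Trie.clen] using set_len_pos _ (TKey.ch c) _

theorem insert_snd_some (w : List Char) (t : Trie) (chars : Int) (m : Int) :
    (insertWord t w chars (some m)).2 = some m := by
  induction w generalizing t chars with
  | nil => cases t; simp [insertWord]
  | cons c rest ih => cases t; simp [insertWord, ih]

theorem sub?_child (cl : TrieList) (c : Char) (p : List Char) :
    (Trie.node cl).sub? (c :: p) =
      match cl.get? (TKey.ch c) with
      | some t' => t'.sub? p
      | none => none := rfl

theorem NEsub_child (cl : TrieList) (c : Char) (dn : Trie)
    (h : NEsub (Trie.node cl)) (hc : cl.get? (TKey.ch c) = some dn) :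
    dn.clen ≠ 0 ∧ NEsub dn := by
  constructor
  · have := h [c] dn (by simp) (by simp [Trie.sub?, hc])
    exact this
  · intro p t' hp hs
    exact h (c :: p) t' (by simp) (by simp [Trie.sub?, hc, hs])

theorem NEsub_empty : NEsub (Trie.node TrieList.nil) := by
  intro p t' hp hs
  cases p with
  | nil => exact absurd rfl hp
  | cons c rest => simp [Trie.sub?, TrieList.get?] at hs

-- the walk result: with min_chars = None, A's inner loop yields the first depth at
-- which the path leaves the trie, or None if w is entirely a path of t
theorem insert_walk (w : List Char) (t : Trie) (chars : Int) (h : NEsub t) :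
    (insertWord t w chars none).2 =
      if lcpT t w < w.length then some (chars + (lcpT t w : Int) + 1) else none := by
  induction w generalizing t chars with
  | nil => cases t; simp [insertWord, lcpT]
  | cons c rest ih =>
    cases t with
    | node cl =>
      cases hg : cl.get? (TKey.ch c) with
      | some dn =>
        have hne := NEsub_child cl c dn h hg
        have : (insertWord (Trie.node cl) (c :: rest) chars none).2
            = (insertWord dn rest (chars + 1) none).2 := by
          simp [insertWord, hg, hne.1]
        rw [this, ih dn (chars + 1) hne.2]
        simp only [lcpT, hg, List.length_cons]
        by_cases hlt : lcpT dn rest < rest.length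
        · simp [hlt]; omega
        · simp [hlt]; omega
      | none =>
        have : (insertWord (Trie.node cl) (c :: rest) chars none).2
            = (insertWord (Trie.node TrieList.nil) rest (chars + 1) (some (chars + 1))).2 := by
          simp [insertWord, hg, get?_set_self, Trie.clen, TrieList.len]
        rw [this, insert_snd_some]
        simp [lcpT, hg]

theorem lcpT_le (t : Trie) (w : List Char) : lcpT t w ≤ w.length := by
  induction w generalizing t with
  | nil => simp [lcpT]
  | cons c rest ih =>
    cases t with
    | node cl =>
      cases hg : cl.get? (TKey.ch c) with
      | some t' => simp only [lcpT, hg, List.length_cons]; have := ih t'; omega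
      | none => simp [lcpT, hg]

theorem lcpT_empty (v : List Char) : lcpT (Trie.node TrieList.nil) v = 0 := by
  cases v <;> simp [lcpT, TrieList.get?]

theorem lcpT_insert (w : List Char) (v : List Char) (t : Trie) (chars : Int) (minc : Option Int) :
    lcpT (insertWord t w chars minc).1 v = max (lcpT t v) (natLcp v w) := by
  induction w generalizing v t chars minc with
  | nil =>
    cases t with
    | node cl =>
      cases v with
      | nil => simp [lcpT, natLcp]
      | cons d vr =>
        have : TKey.mark ≠ TKey.ch d := by simp
        simp [insertWord, lcpT, natLcp, get?_set_ne cl TKey.mark (TKey.ch d) _ this]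
  | cons c rest ih =>
    cases t with
    | node cl =>
      cases v with
      | nil => simp [lcpT, natLcp]
      | cons d vr =>
        by_cases hdc : d = c
        · subst hdc
          cases hg : cl.get? (TKey.ch d) with
          | some dn =>
            simp only [insertWord, hg, Option.isSome_some, if_true, Option.getD_some,
              lcpT, natLcp, if_true]
            rw [get?_set_self]
            simp only [ih]
            omega
          | none =>
            simp only [insertWord, hg, Option.isSome_none, Bool.false_eq_true, if_false]
            simp only [lcpT, natLcp, hg]
            rw [get?_set_self]
            simp only [get?_set_self, Option.getD_some]
            rw [ih, lcpT_empty]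
            simp
        · have hk : TKey.ch c ≠ TKey.ch d := by intro h'; exact hdc (TKey.ch.inj h').symm
          cases hg : cl.get? (TKey.ch c) with
          | some dn =>
            simp only [insertWord, hg, Option.isSome_some, if_true, Option.getD_some]
            simp only [lcpT, natLcp, hdc, if_false]
            rw [get?_set_ne _ _ _ _ hk]
            simp
          | none =>
            simp only [insertWord, hg, Option.isSome_none, Bool.false_eq_true, if_false]
            simp only [lcpT, natLcp, hdc, if_false]
            rw [get?_set_ne _ _ _ _ hk, get?_set_ne _ _ _ _ hk]
            simp

theorem NEsub_insert (w : List Char) (t : Trie) (chars : Int) (minc : Option Int)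
    (h : NEsub t) : NEsub (insertWord t w chars minc).1 := by
  induction w generalizing t chars minc with
  | nil =>
    cases t with
    | node cl =>
      intro p t' hp hs
      cases p with
      | nil => exact absurd rfl hp
      | cons d pr =>
        have hk : TKey.mark ≠ TKey.ch d := by simp
        simp only [insertWord] at hs
        rw [sub?_child, get?_set_ne cl TKey.mark (TKey.ch d) _ hk] at hs
        cases hg : cl.get? (TKey.ch d) with
        | some dn =>
          rw [hg] at hs
          exact h (d :: pr) t' (by simp) (by simp [Trie.sub?, hg, hs])
        | none => rw [hg] at hs; exact absurd hs (by simp)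
  | cons c rest ih =>
    cases t with
    | node cl =>
      intro p t' hp hs
      cases p with
      | nil => exact absurd rfl hp
      | cons d pr =>
        by_cases hdc : d = c
        · subst hdc
          -- path goes through the (re)inserted child r.1
          cases hg : cl.get? (TKey.ch d) with
          | some dn =>
            have hne := NEsub_child cl d dn h hg
            simp only [insertWord, hg, Option.isSome_some, if_true, Option.getD_some] at hs
            rw [sub?_child, get?_set_self] at hs
            cases pr with
            | nil =>
              simp only [Trie.sub?, Option.some.injEq] at hs
              subst hs; exact insert_fst_clen dn rest _ _
            | cons e er =>
              exact ih dn _ _ hne.2 (e :: er) t' (by simp) hs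
          | none =>
            simp only [insertWord, hg, Option.isSome_none, Bool.false_eq_true, if_false] at hs
            rw [sub?_child, get?_set_self, get?_set_self] at hs
            simp only [Option.getD_some] at hs
            cases pr with
            | nil =>
              simp only [Trie.sub?, Option.some.injEq] at hs
              subst hs; exact insert_fst_clen _ rest _ _
            | cons e er =>
              exact ih (Trie.node TrieList.nil) _ _ NEsub_empty (e :: er) t' (by simp) hs
        · have hk : TKey.ch c ≠ TKey.ch d := by intro h'; exact hdc (TKey.ch.inj h').symm
          -- a different branch: untouched subtree of t
          cases hg : cl.get? (TKey.ch c) with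
          | some dn =>
            simp only [insertWord, hg, Option.isSome_some, if_true, Option.getD_some] at hs
            rw [sub?_child, get?_set_ne _ _ _ _ hk] at hs
            cases hg' : cl.get? (TKey.ch d) with
            | some dm =>
              rw [hg'] at hs
              exact h (d :: pr) t' (by simp) (by simp [Trie.sub?, hg', hs])
            | none => rw [hg'] at hs; exact absurd hs (by simp)
          | none =>
            simp only [insertWord, hg, Option.isSome_none, Bool.false_eq_true, if_false] at hs
            rw [sub?_child, get?_set_ne _ _ _ _ hk, get?_set_ne _ _ _ _ hk] at hs
            cases hg' : cl.get? (TKey.ch d) with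
            | some dm =>
              rw [hg'] at hs
              exact h (d :: pr) t' (by simp) (by simp [Trie.sub?, hg', hs])
            | none => rw [hg'] at hs; exact absurd hs (by simp)

theorem bLcp_eq_natLcp (a b : List Char) : bLcp a b = (natLcp a b : Int) := by
  induction a generalizing b with
  | nil => cases b <;> simp [bLcp, natLcp]
  | cons x xs ih =>
    cases b with
    | nil => simp [bLcp, natLcp]
    | cons y ys => by_cases h : x = y <;> simp [bLcp, natLcp, h, ih]

theorem bFold_eq_specLcp (w : List Char) (seen : List String) (m : Nat) :
    seen.foldl (fun best u => let k := bLcp w u.toList; if k > best then k else best) (m : Int)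
      = (seen.foldl (fun m u => max m (natLcp w u.toList)) m : Nat) := by
  induction seen generalizing m with
  | nil => simp
  | cons u us ih =>
    rw [List.foldl_cons, List.foldl_cons]
    have h1 : (let k := bLcp w u.toList; if k > ((m : Nat) : Int) then k else ((m : Nat) : Int))
        = ((max m (natLcp w u.toList) : Nat) : Int) := by
      simp only [bLcp_eq_natLcp]
      by_cases h : m < natLcp w u.toList
      · simp [h]; omega
      · simp [h]; omega
    rw [h1, ih]

theorem specLcp_append (seen : List String) (w : String) (v : List Char) :
    specLcp (seen ++ [w]) v = max (specLcp seen v) (natLcp v w.toList) := by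
  simp [specLcp]

theorem main_fold (ws : List String) (t : Trie) (seen : List String) (tot : Int)
    (hl : ∀ v, lcpT t v = specLcp seen v) (hn : NEsub t) :
    (ws.foldl
      (fun (st : Trie × Int) w =>
        let r := insertWord st.1 w.toList 0 none
        (r.1, st.2 + (match r.2 with
                      | some m => m
                      | none => (w.toList.length : Int)))) (t, tot)).2
    = (ws.foldl
      (fun (st : List String × Int) w =>
        let best := st.1.foldl
          (fun best u => let k := bLcp w.toList u.toList; if k > best then k else best) 0
        (st.1 ++ [w], st.2 + min (best + 1) (w.toList.length : Int))) (seen, tot)).2 := by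
  induction ws generalizing t seen tot with
  | nil => simp
  | cons w rest ih =>
    simp only [List.foldl_cons]
    have hbest : (seen.foldl
        (fun best u => let k := bLcp w.toList u.toList; if k > best then k else best) (0 : Int))
        = ((specLcp seen w.toList : Nat) : Int) := by
      have := bFold_eq_specLcp w.toList seen 0
      simpa [specLcp] using this
    have hcontrib :
        (match (insertWord t w.toList 0 none).2 with
         | some m => m
         | none => (w.toList.length : Int))
        = min (((specLcp seen w.toList : Nat) : Int) + 1) (w.toList.length : Int) := by
      rw [insert_walk w.toList t 0 hn, hl w.toList]
      have hle : lcpT t w.toList ≤ w.toList.length := lcpT_le t w.toList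
      rw [hl w.toList] at hle
      by_cases hlt : specLcp seen w.toList < w.toList.length
      · rw [if_pos hlt]
        show ((0 : Int) + (specLcp seen w.toList : Int) + 1)
            = min (((specLcp seen w.toList : Nat) : Int) + 1) (w.toList.length : Int)
        have : ((specLcp seen w.toList : Nat) : Int) < (w.toList.length : Int) := by
          exact_mod_cast hlt
        omega
      · have heq : specLcp seen w.toList = w.toList.length := by omega
        rw [if_neg hlt]
        show ((w.toList.length : Nat) : Int)
            = min (((specLcp seen w.toList : Nat) : Int) + 1) (w.toList.length : Int)
        rw [heq]; omega
    apply Eq.trans (ih (insertWord t w.toList 0 none).1 (seen ++ [w]) _ ?_ ?_)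
    · rw [hbest, hcontrib]
    · intro v
      rw [lcpT_insert, hl v, specLcp_append]
    · exact NEsub_insert w.toList t 0 none hn

-- ===== VERDICT (by name: the statement is the Claim_ definition above) =====
theorem solve_spec : Claim_equal_solve := by
  intro words _
  unfold Spec_solve solve solve_alt
  exact main_fold words (Trie.node TrieList.nil) [] 0
    (fun v => by rw [lcpT_empty]; simp [specLcp]) NEsub_empty
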